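-- pv_equiv track=rewrite | github.com/ROHANSAMUEL134/ACC28-Altruisty-Coding-Challenges | ACC28 Altruisty Coding Challenge/Q3/Q3.py | issteppingnumber
-- ===== SOURCE A (Python) =====
-- def issteppingnumber(num):
--     prev=-1
--     while num:
--         if prev!=-1 and abs(prev-num%10)!=1:
--             return False
--         prev=num%10
--         num//=10
--     return True
-- ===== SOURCE B (Python) =====
-- def issteppingnumber(num):
--     if num < 0:
--         return False
--     digits = []
--     while num:
--         digits.append(num % 10)
--         num //= 10
--     return all(abs(digits[i] - digits[i + 1]) == 1 for i in range(len(digits) - 1))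
-- ===== Notes on version B (the rewrite author's own statement) =====
-- stated objective: alternative
-- what changed: B rejects negatives up front and then materializes the whole digit list in one loop before checking adjacent differences in a separate pass, instead of A's fused single loop carrying a prev sentinel (which on negatives grinds to the stable -1 state and returns False).
import Mathlib
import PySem

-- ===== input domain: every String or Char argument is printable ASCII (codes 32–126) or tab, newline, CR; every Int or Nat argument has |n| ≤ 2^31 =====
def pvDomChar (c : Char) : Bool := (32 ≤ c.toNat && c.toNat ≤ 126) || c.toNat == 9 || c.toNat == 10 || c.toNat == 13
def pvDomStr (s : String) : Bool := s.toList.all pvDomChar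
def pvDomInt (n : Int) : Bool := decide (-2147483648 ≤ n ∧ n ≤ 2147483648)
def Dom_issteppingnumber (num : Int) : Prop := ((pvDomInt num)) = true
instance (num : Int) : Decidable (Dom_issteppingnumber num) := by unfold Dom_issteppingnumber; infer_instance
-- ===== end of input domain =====

-- B changes the decomposition: one loop materializes the digit list, a second pass checks adjacency (alternative, not faster).

-- ===== PORT A =====
-- A's while-loop: prev sentinel -1, digit = num % 10, num //= 10; for num > 0 Python's
-- % and // on nonnegatives coincide with Nat's, so the loop runs on num.toNat.
-- For num < 0 Python's loop always terminates with `return False` (num //= 10 stabilizes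
-- at -1, whose digit 9 then repeats with difference 0); that iteration count is not
-- structural, so the port returns that constant False for the negative branch directly.
def pvALoop (prev : Int) (num : Nat) : Bool :=
  if num = 0 then true
  else if prev ≠ -1 ∧ (prev - (num % 10 : Nat)).natAbs ≠ 1 then false
  else pvALoop ((num % 10 : Nat) : Int) (num / 10)
  decreasing_by exact Nat.div_lt_self (Nat.pos_of_ne_zero (by assumption)) (by norm_num)

def issteppingnumber (num : Int) : Bool :=
  if num < 0 then false else pvALoop (-1) num.toNat

-- ===== PORT B =====
-- B's first loop: collect num % 10 into digits (after B's explicit negative check).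
def pvDigits (num : Nat) : List Int :=
  if num = 0 then [] else ((num % 10 : Nat) : Int) :: pvDigits (num / 10)
  decreasing_by exact Nat.div_lt_self (Nat.pos_of_ne_zero (by assumption)) (by norm_num)

-- B's second pass: all(abs(digits[i]-digits[i+1])==1 for i in range(len(digits)-1))
def pvAdjOk : List Int → Bool
  | a :: b :: rest => (a - b).natAbs == 1 && pvAdjOk (b :: rest)
  | _ => true

def issteppingnumber_alt (num : Int) : Bool :=
  if num < 0 then false else pvAdjOk (pvDigits num.toNat)

-- ===== PRECONDITION & SPEC =====
def Spec_issteppingnumber (num : Int) (out : Bool) : Prop := out = issteppingnumber_alt num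
instance (num : Int) (out : Bool) : Decidable (Spec_issteppingnumber num out) := by unfold Spec_issteppingnumber; infer_instance

-- ===== CLAIM (what is proved, stated in full; the proofs are below) =====
def Claim_equal_issteppingnumber : Prop := ∀ (num : Int), Dom_issteppingnumber num → Spec_issteppingnumber num (issteppingnumber num)

-- ===== LEMMAS AND PROOFS =====

theorem pvALoop_eq_adjOk (n : Nat) : ∀ prev : Int, 0 ≤ prev →
    pvALoop prev n = pvAdjOk (prev :: pvDigits n) := by
  induction n using Nat.strong_induction_on with
  | _ n ih =>
    intro prev hprev
    by_cases h0 : n = 0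
    · subst h0
      simp [pvALoop, pvDigits, pvAdjOk]
    · have hprev' : prev ≠ -1 := by omega
      have hrec := ih (n / 10)
        (Nat.div_lt_self (Nat.pos_of_ne_zero h0) (by norm_num))
        ((n % 10 : Nat) : Int) (by positivity)
      rw [pvALoop, pvDigits, if_neg h0, if_neg h0]
      by_cases hd : (prev - ((n % 10 : Nat) : Int)).natAbs = 1
      · rw [if_neg (by push_cast at hd ⊢; simp [hd]), hrec, pvAdjOk]
        push_cast at hd ⊢
        simp [hd]
      · rw [if_pos ⟨hprev', hd⟩, pvAdjOk]
        push_cast at hd ⊢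
        simp [hd]

theorem pvALoop_top (n : Nat) : pvALoop (-1) n = pvAdjOk (pvDigits n) := by
  by_cases h0 : n = 0
  · subst h0; simp [pvALoop, pvDigits, pvAdjOk]
  · rw [pvALoop, pvDigits, if_neg h0, if_neg h0]
    rw [if_neg (by simp)]
    exact pvALoop_eq_adjOk (n / 10) ((n % 10 : Nat) : Int) (by positivity)

-- ===== VERDICT (by name: the statement is the Claim_ definition above) =====
theorem issteppingnumber_spec : Claim_equal_issteppingnumber := by
  intro num _
  unfold Spec_issteppingnumber issteppingnumber issteppingnumber_alt
  by_cases hn : num < 0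
  · simp [hn]
  · simp only [hn, if_false]
    exact pvALoop_top num.toNat
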